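-- pv_equiv track=rewrite | github.com/zackeua/AdventOfCode | 2023/dag13/13_1.py | find_col_reflections
-- ===== SOURCE A (Python) =====
-- def find_col_reflections(grid: list[str]):
--     for i in range(len(grid)):
--         offset = i+1
--         upper = grid[:offset]
--         lower = grid[offset:2*offset]
--         if len(upper) < len(lower):
--             lower = lower[::-1]
--         else:
--             upper = upper[::-1]
--         matching = True
--         for u, l in zip(upper, lower):
--             if u != l:
--                 matching = False
--         if matching:
--             return len(upper)
-- ===== SOURCE B (Python) =====
-- def find_col_reflections(grid: list[str]):
--     # Two-pointer mirror expansion with early exit: no slices, reversals or zips.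
--     n = len(grid)
--     for offset in range(1, n + 1):
--         a, b = offset - 1, offset
--         while a >= 0 and b < n and grid[a] == grid[b]:
--             a -= 1
--             b += 1
--         if a < 0 or b >= n:
--             return offset
-- ===== Notes on version B (the rewrite author's own statement) =====
-- stated objective: faster
-- what changed: Replaces per-candidate list slicing, reversal, zip and a full no-early-exit fold with a two-pointer mirror expansion over indices that stops at the first mismatching pair and allocates nothing.
import Mathlib
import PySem

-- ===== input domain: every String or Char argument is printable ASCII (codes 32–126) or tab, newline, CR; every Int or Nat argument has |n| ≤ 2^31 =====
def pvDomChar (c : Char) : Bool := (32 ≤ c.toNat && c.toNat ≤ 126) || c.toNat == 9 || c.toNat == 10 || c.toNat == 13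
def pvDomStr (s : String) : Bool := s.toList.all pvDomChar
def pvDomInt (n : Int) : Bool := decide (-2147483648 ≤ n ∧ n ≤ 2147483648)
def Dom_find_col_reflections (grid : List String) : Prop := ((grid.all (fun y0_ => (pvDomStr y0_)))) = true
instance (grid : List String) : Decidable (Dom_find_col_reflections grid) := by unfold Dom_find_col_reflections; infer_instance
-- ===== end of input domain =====

-- B replaces A's per-candidate slice/reverse/zip full scan by a two-pointer mirror expansion
-- over indices with early exit (objective: faster, constant-factor/typical-case mechanism).

-- ===== PORT A =====
def pvA_go (grid : List String) : List Nat → Option Int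
  | [] => none
  | i :: rest =>
    let offset := i + 1
    let upper := PySem.List.slice grid none (some (offset : Int))
    let lower := PySem.List.slice grid (some (offset : Int)) (some ((2 * offset : Nat) : Int))
    let ul := if upper.length < lower.length then (upper, lower.reverse) else (upper.reverse, lower)
    let matching := (ul.1.zip ul.2).foldl (fun m p => if p.1 != p.2 then false else m) true
    if matching then some ((ul.1.length : Int)) else pvA_go grid rest

def find_col_reflections (grid : List String) : Option Int :=
  pvA_go grid (List.range grid.length)

-- ===== PORT B =====
-- the 'while a >= 0 and b < n and grid[a] == grid[b]: a -= 1; b += 1' loop; returns final (a, b)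
def pvB_while (grid : List String) (a b : Int) : Int × Int :=
  if h : 0 ≤ a ∧ b < (grid.length : Int) ∧ PySem.List.pyGet? grid a = PySem.List.pyGet? grid b then
    pvB_while grid (a - 1) (b + 1)
  else (a, b)
termination_by (a + 1).toNat
decreasing_by
  obtain ⟨h1, -, -⟩ := h
  omega

def pvB_go (grid : List String) : List Nat → Option Int
  | [] => none
  | off :: rest =>
    let ab := pvB_while grid ((off : Int) - 1) (off : Int)
    if ab.1 < 0 ∨ (grid.length : Int) ≤ ab.2 then some ((off : Int)) else pvB_go grid rest

def find_col_reflections_alt (grid : List String) : Option Int :=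
  pvB_go grid (List.range' 1 grid.length)

-- ===== PRECONDITION & SPEC =====
def Spec_find_col_reflections (grid : List String) (out : Option Int) : Prop := out = find_col_reflections_alt grid
instance (grid : List String) (out : Option Int) : Decidable (Spec_find_col_reflections grid out) := by unfold Spec_find_col_reflections; infer_instance

-- ===== CLAIM (what is proved, stated in full; the proofs are below) =====
def Claim_equal_find_col_reflections : Prop := ∀ (grid : List String), Dom_find_col_reflections grid → Spec_find_col_reflections grid (find_col_reflections grid)

-- ===== LEMMAS AND PROOFS =====

-- B's while loop ends with a pointer out of range iff every in-range mirrored pair agrees.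
theorem pvB_while_done (grid : List String) (a b : Int) :
    a < (grid.length : Int) → 0 ≤ b →
    (((pvB_while grid a b).1 < 0 ∨ (grid.length : Int) ≤ (pvB_while grid a b).2) ↔
      (∀ k : Nat, (k : Int) ≤ a → b + k < (grid.length : Int) →
        PySem.List.pyGet? grid (a - k) = PySem.List.pyGet? grid (b + k))) := by
  induction a, b using pvB_while.induct grid with
  | case1 a b h ih =>
    intro ha hb
    obtain ⟨h0, hbN, heq⟩ := h
    rw [pvB_while, dif_pos ⟨h0, hbN, heq⟩]
    rw [ih (by omega) (by omega)]
    constructor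
    · intro H k hk1 hk2
      cases k with
      | zero => simpa using heq
      | succ k =>
        have := H k (by push_cast at hk1 ⊢; omega) (by push_cast at hk2 ⊢; omega)
        convert this using 2 <;> push_cast <;> ring
    · intro H k hk1 hk2
      have := H (k + 1) (by push_cast; omega) (by push_cast; omega)
      convert this using 2 <;> push_cast <;> ring
  | case2 a b h =>
    intro ha hb
    rw [pvB_while, dif_neg h]
    by_cases h0 : a < 0
    · constructor
      · intro _ k hk1 hk2; exfalso; omega
      · intro _; left; exact h0
    · by_cases hbN : (grid.length : Int) ≤ b
      · constructor
        · intro _ k hk1 hk2; exfalso; omega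
        · intro _; right; exact hbN
      · have hne : PySem.List.pyGet? grid a ≠ PySem.List.pyGet? grid b :=
          fun e => h ⟨by omega, by omega, e⟩
        constructor
        · rintro (h' | h') <;> (exfalso; omega)
        · intro H
          exfalso
          exact hne (by simpa using H 0 (by omega) (by omega))

-- A's pairwise scan at split i+1 agrees with B's mirrored-index condition.
theorem pv_mirror_bridge (grid : List String) (i : Nat) (hi : i < grid.length) :
    ((((grid.take (i+1)).reverse.zip ((grid.drop (i+1)).take (i+1))).any
        (fun p => p.1 != p.2)) = false ↔
      (∀ k : Nat, (k : Int) ≤ (i : Int) → ((i : Nat) + 1 : Int) + k < (grid.length : Int) →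
        PySem.List.pyGet? grid ((i : Int) - k) = PySem.List.pyGet? grid (((i : Nat) + 1 : Int) + k))) := by
  have hlen : (((grid.take (i+1)).reverse.zip ((grid.drop (i+1)).take (i+1))).length)
      = min (i+1) (grid.length - (i+1)) := by
    simp [List.length_zip]
  rw [List.any_eq_false]
  constructor
  · intro H k hk1 hk2
    have hk : k ≤ i := by exact_mod_cast hk1
    have hk2' : i + 1 + k < grid.length := by omega
    have hj : k < (((grid.take (i+1)).reverse.zip ((grid.drop (i+1)).take (i+1))).length) := by
      omega
    have hmem := H _ (List.getElem_mem hj)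
    rw [List.getElem_zip] at hmem
    simp only [List.getElem_reverse, List.getElem_take, List.getElem_drop,
      bne_iff_ne, ne_eq, not_not, List.length_take] at hmem
    have e1 : (i : Int) - k = ((i - k : Nat) : Int) := by omega
    have e2 : ((i : Nat) + 1 : Int) + k = (((i + 1 + k : Nat)) : Int) := by push_cast; ring
    rw [e1, e2, PySem.List.pyGet?_natCast, PySem.List.pyGet?_natCast,
      List.getElem?_eq_getElem (by omega), List.getElem?_eq_getElem (by omega)]
    have e3 : min (i+1) grid.length - 1 - k = i - k := by omega
    have hval : grid[i - k] = grid[i + 1 + k] := by simpa [e3] using hmem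
    exact congrArg some hval
  · intro H p hp
    obtain ⟨j, hj, rfl⟩ := List.mem_iff_getElem.mp hp
    rw [List.getElem_zip]
    have hjb : j < min (i+1) (grid.length - (i+1)) := by omega
    have := H j (by omega) (by omega)
    have e1 : (i : Int) - j = ((i - j : Nat) : Int) := by omega
    have e2 : ((i : Nat) + 1 : Int) + j = (((i + 1 + j : Nat)) : Int) := by push_cast; ring
    rw [e1, e2, PySem.List.pyGet?_natCast, PySem.List.pyGet?_natCast,
      List.getElem?_eq_getElem (by omega), List.getElem?_eq_getElem (by omega)] at this
    simp only [List.getElem_reverse, List.getElem_take, List.getElem_drop,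
      bne_iff_ne, ne_eq, not_not, List.length_take]
    have e3 : min (i+1) grid.length - 1 - j = i - j := by omega
    simpa [e3] using Option.some.inj this

theorem pv_go_eq (grid : List String) (l : List Nat) (hl : ∀ i ∈ l, i < grid.length) :
    pvA_go grid l = pvB_go grid (l.map (· + 1)) := by
  induction l with
  | nil => rfl
  | cons i rest ih =>
    have hi : i < grid.length := hl i (by simp)
    have hrest : ∀ j ∈ rest, j < grid.length := fun j hj => hl j (by simp [hj])
    simp only [List.map_cons, pvA_go, pvB_go]
    -- compute A's slices
    have hup : PySem.List.slice grid none (some ((i + 1 : Nat) : Int)) = grid.take (i+1) :=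
      PySem.List.slice_to_natCast grid (i+1)
    have hlo : PySem.List.slice grid (some ((i + 1 : Nat) : Int)) (some ((2 * (i + 1) : Nat) : Int))
        = (grid.drop (i+1)).take (i+1) := by
      rw [PySem.List.slice_natCast]
      congr 1
      omega
    rw [hup, hlo]
    have hcond : ¬ ((grid.take (i+1)).length < ((grid.drop (i+1)).take (i+1)).length) := by
      simp
      omega
    rw [if_neg hcond]
    -- A's matching fold is a no-early-exit all-pairs test
    rw [PySem.List.foldl_if_false_eq (fun p : String × String => p.1 != p.2)]
    -- B's while loop condition
    have hbw := pvB_while_done grid (((i + 1 : Nat) : Int) - 1) ((i + 1 : Nat) : Int)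
      (by push_cast; omega) (by push_cast; omega)
    have ea : ((i + 1 : Nat) : Int) - 1 = (i : Int) := by push_cast; ring
    rw [ea] at hbw
    by_cases hm : (((grid.take (i+1)).reverse.zip ((grid.drop (i+1)).take (i+1))).any
        (fun p => p.1 != p.2)) = false
    · have hB := (pv_mirror_bridge grid i hi).mp hm
      rw [if_pos (by simp [hm]), if_pos (by rw [ea]; exact hbw.mpr (by push_cast at hB ⊢; exact hB))]
      simp
      omega
    · have hB : ¬ (∀ k : Nat, (k : Int) ≤ (i : Int) → ((i : Nat) + 1 : Int) + k < (grid.length : Int) →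
          PySem.List.pyGet? grid ((i : Int) - k) = PySem.List.pyGet? grid (((i : Nat) + 1 : Int) + k)) :=
        fun h => hm ((pv_mirror_bridge grid i hi).mpr h)
      rw [if_neg (by simp [hm]), if_neg (by rw [ea]; exact fun h => hB ((hbw.mp (by push_cast at h ⊢; exact h))))]
      exact ih hrest

-- ===== VERDICT (by name: the statement is the Claim_ definition above) =====
theorem find_col_reflections_spec : Claim_equal_find_col_reflections := by
  intro grid _
  unfold Spec_find_col_reflections find_col_reflections find_col_reflections_alt
  rw [pv_go_eq grid _ (fun i hi => List.mem_range.mp hi)]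
  congr 1
  rw [List.range'_eq_map_range]
  exact List.map_congr_left (fun x _ => Nat.add_comm x 1)
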